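-- pv_equiv track=rewrite | github.com/pypi-data/pypi-mirror-236 | packages/runexp/runexp-0.0.5-py3-none-any.whl/runexp/parser_utils.py | remove_runexp_args
-- ===== SOURCE A (Python) =====
-- import enum
--
-- class Options(enum.Enum):
--     "some reserved prefix"
--
--     SLURM = "runexp-slurm"
--     NO_DRY = "runexp-no-dry-run"
--     SLURM_ARG = "runexp-slurm-verbatim"
--     TEMPLATE_SLURM = "runexp-slurm-template"
--     MAX_CONCURRENT_SWEEP = "runexp-max-concurrent-sweep"
--
--     @property
--     def arg(self) -> str:
--         "formatted as --option"
--         return "--" + self.value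
--
--     @property
--     def dest(self) -> str:
--         "key in the namespace"
--         return self.value.replace("-", "_")
--
--     @staticmethod
--     def is_reserved(dest: str):
--         return dest in [p.dest for p in Options]
--
--     @staticmethod
--     def all_prefixes():
--         return [p.value for p in Options]
--
-- def remove_runexp_args(args: list[str]) -> list[str]:
--     "return a copy of args without runexp general arguments"
--
--     bad_indices: list[int] = []
--     for idx, arg in enumerate(args):
--         if not arg.startswith("--"):
--             continue
--
--         # key-value options
--         if arg in [Options.SLURM_ARG.arg, Options.TEMPLATE_SLURM.arg, Options.MAX_CONCURRENT_SWEEP.arg]: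
--             bad_indices += [idx, idx + 1]
--
--         # flag options
--         if arg in [Options.SLURM.arg, Options.NO_DRY.arg]:
--             bad_indices += [idx]
--
--     return [a for i, a in enumerate(args) if i not in bad_indices]
-- ===== SOURCE B (Python) =====
-- def remove_runexp_args(args: list[str]) -> list[str]:
--     "return a copy of args without runexp general arguments"
--     kv = {"--runexp-slurm-verbatim", "--runexp-slurm-template", "--runexp-max-concurrent-sweep"}
--     flags = {"--runexp-slurm", "--runexp-no-dry-run"}
--     out = []
--     prev = None
--     for a in args:
--         if a not in kv and a not in flags and prev not in kv:
--             out.append(a)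
--         prev = a
--     return out
-- ===== Notes on version B (the rewrite author's own statement) =====
-- stated objective: simpler
-- what changed: Replaces the two-pass bad-index-table construction plus enumerated filter with a single pass that tracks the previous token and keeps an arg iff it is not reserved and the previous arg is not a key-value reserved option.
import Mathlib
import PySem

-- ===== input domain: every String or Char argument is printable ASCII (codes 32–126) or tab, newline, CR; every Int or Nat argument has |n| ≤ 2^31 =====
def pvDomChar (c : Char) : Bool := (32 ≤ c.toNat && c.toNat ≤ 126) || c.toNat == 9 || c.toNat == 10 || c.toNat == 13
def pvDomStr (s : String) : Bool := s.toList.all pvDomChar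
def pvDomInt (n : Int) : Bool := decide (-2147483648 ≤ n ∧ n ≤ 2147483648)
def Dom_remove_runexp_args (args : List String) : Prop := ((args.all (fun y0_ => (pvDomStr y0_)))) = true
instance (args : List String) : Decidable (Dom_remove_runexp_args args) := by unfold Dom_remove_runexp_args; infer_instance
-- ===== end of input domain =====

-- B replaces A's bad-index table + second enumerated filtering pass by one pass that
-- tracks the previous token (objective: simpler).

-- ===== PORT A =====
-- [Options.SLURM_ARG.arg, Options.TEMPLATE_SLURM.arg, Options.MAX_CONCURRENT_SWEEP.arg]
def pvKV : List String := ["--runexp-slurm-verbatim", "--runexp-slurm-template", "--runexp-max-concurrent-sweep"]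
-- [Options.SLURM.arg, Options.NO_DRY.arg]
def pvFlag : List String := ["--runexp-slurm", "--runexp-no-dry-run"]

def remove_runexp_args (args : List String) : List String :=
  let bad_indices : List Int :=
    (PySem.List.enumerate args).foldl (fun bad p =>
      if !(PySem.Str.startswith p.2 "--") then bad   -- 'continue'
      else
        -- key-value options
        let bad := if p.2 ∈ pvKV then bad ++ [p.1, p.1 + 1] else bad
        -- flag options
        if p.2 ∈ pvFlag then bad ++ [p.1] else bad) []
  ((PySem.List.enumerate args).filter (fun p => decide (p.1 ∉ bad_indices))).map (fun p => p.2)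

-- ===== PORT B =====
def pvKVSet : PySem.Set String :=
  PySem.Set.ofList ["--runexp-slurm-verbatim", "--runexp-slurm-template", "--runexp-max-concurrent-sweep"]
def pvFlagSet : PySem.Set String :=
  PySem.Set.ofList ["--runexp-slurm", "--runexp-no-dry-run"]

def remove_runexp_args_alt (args : List String) : List String :=
  (args.foldl (fun (st : Option String × List String) a =>
      let keep := !(PySem.Set.contains pvKVSet a) && !(PySem.Set.contains pvFlagSet a) &&
                  !(match st.1 with | some pv => PySem.Set.contains pvKVSet pv | none => false)
      (some a, if keep then st.2 ++ [a] else st.2)) (none, [])).2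

-- ===== PRECONDITION & SPEC =====
def Spec_remove_runexp_args (args : List String) (out : List String) : Prop := out = remove_runexp_args_alt args
instance (args : List String) (out : List String) : Decidable (Spec_remove_runexp_args args out) := by unfold Spec_remove_runexp_args; infer_instance

-- ===== CLAIM (what is proved, stated in full; the proofs are below) =====
def Claim_equal_remove_runexp_args : Prop := ∀ (args : List String), Dom_remove_runexp_args args → Spec_remove_runexp_args args (remove_runexp_args args)

-- ===== LEMMAS AND PROOFS =====

-- shared reference: process the list left to right; b says "previous token was a kv option"
def pvG : Bool → List String → List String
  | _, [] => []
  | b, a :: t => (if b = true ∨ a ∈ pvKV ∨ a ∈ pvFlag then [] else [a]) ++ pvG (decide (a ∈ pvKV)) t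

lemma pvKVSet_eq : (pvKVSet : List String) = pvKV := by decide
lemma pvFlagSet_eq : (pvFlagSet : List String) = pvFlag := by decide

lemma mem_kvset (a : String) : a ∈ pvKVSet ↔ a ∈ pvKV := by rw [pvKVSet_eq]
lemma mem_flagset (a : String) : a ∈ pvFlagSet ↔ a ∈ pvFlag := by rw [pvFlagSet_eq]

def pvPrevB : Option String → Bool
  | some pv => PySem.Set.contains pvKVSet pv
  | none => false

lemma B_fold (t : List String) : ∀ (prev : Option String) (acc : List String),
    (t.foldl (fun (st : Option String × List String) a =>
      let keep := !(PySem.Set.contains pvKVSet a) && !(PySem.Set.contains pvFlagSet a) &&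
                  !(match st.1 with | some pv => PySem.Set.contains pvKVSet pv | none => false)
      (some a, if keep then st.2 ++ [a] else st.2)) (prev, acc)).2
    = acc ++ pvG (pvPrevB prev) t := by
  induction t with
  | nil => intro prev acc; simp [pvG]
  | cons a t ih =>
    intro prev acc
    rw [List.foldl_cons, ih (some a)]
    have hmatch : (match prev with | some pv => PySem.Set.contains pvKVSet pv | none => false) = pvPrevB prev := by
      cases prev <;> rfl
    simp only [hmatch, pvG]
    have hpa : pvPrevB (some a) = decide (a ∈ pvKV) := by
      simp [pvPrevB, mem_kvset]
    rw [hpa]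
    by_cases h1 : a ∈ pvKV <;> by_cases h2 : a ∈ pvFlag <;> cases hb : pvPrevB prev <;>
      simp [h1, h2, mem_kvset, mem_flagset]

-- A's bad-index table is a flatMap of local contributions
def pvContrib (p : Int × String) : List Int :=
  if !(PySem.Str.startswith p.2 "--") then []
  else (if p.2 ∈ pvKV then [p.1, p.1 + 1] else []) ++ (if p.2 ∈ pvFlag then [p.1] else [])

lemma sw_of_mem_kv {a : String} (h : a ∈ pvKV) : PySem.Str.startswith a "--" = true := by
  fin_cases h <;> decide
lemma sw_of_mem_flag {a : String} (h : a ∈ pvFlag) : PySem.Str.startswith a "--" = true := by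
  fin_cases h <;> decide

lemma stepA_eq (bad : List Int) (p : Int × String) :
    (if !(PySem.Str.startswith p.2 "--") then bad
     else
       let bad := if p.2 ∈ pvKV then bad ++ [p.1, p.1 + 1] else bad
       if p.2 ∈ pvFlag then bad ++ [p.1] else bad) = bad ++ pvContrib p := by
  unfold pvContrib
  split_ifs <;> simp

lemma badIndices_eq (args : List String) :
    ((PySem.List.enumerate args).foldl (fun bad p =>
      if !(PySem.Str.startswith p.2 "--") then bad
      else
        let bad := if p.2 ∈ pvKV then bad ++ [p.1, p.1 + 1] else bad
        if p.2 ∈ pvFlag then bad ++ [p.1] else bad) [])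
    = (PySem.List.enumerate args).flatMap pvContrib := by
  have : (fun (bad : List Int) (p : Int × String) =>
      if !(PySem.Str.startswith p.2 "--") then bad
      else
        let bad := if p.2 ∈ pvKV then bad ++ [p.1, p.1 + 1] else bad
        if p.2 ∈ pvFlag then bad ++ [p.1] else bad)
      = (fun bad p => bad ++ pvContrib p) := by
    funext bad p; exact stepA_eq bad p
  rw [this, PySem.List.foldl_append_eq_flatMap]
  simp

lemma mem_contrib (i m : Int) (a : String) :
    i ∈ pvContrib (m, a) ↔ (a ∈ pvKV ∧ (i = m ∨ i = m + 1)) ∨ (a ∈ pvFlag ∧ i = m) := by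
  unfold pvContrib
  by_cases hsw : PySem.Str.startswith a "--" = true
  · simp only [hsw]
    by_cases h1 : a ∈ pvKV <;> by_cases h2 : a ∈ pvFlag <;> first
      | (simp [h1, h2]; tauto)
      | simp [h1, h2]
  · have h1 : a ∉ pvKV := fun h => hsw (sw_of_mem_kv h)
    have h2 : a ∉ pvFlag := fun h => hsw (sw_of_mem_flag h)
    simp [Bool.not_eq_true] at hsw
    simp [hsw, h1, h2]

-- index j (relative to the suffix s; b = "the token before s is a kv option") is dropped
def pvBadAt (b : Bool) (s : List String) (j : Nat) : Prop :=
  (j = 0 ∧ b = true) ∨ (∃ _ : j < s.length, s[j] ∈ pvKV ∨ s[j] ∈ pvFlag)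
    ∨ (∃ k : Nat, j = k + 1 ∧ ∃ _ : k < s.length, s[k] ∈ pvKV)

lemma badAt_succ (b : Bool) (a : String) (t : List String) (j : Nat) :
    pvBadAt b (a :: t) (j + 1) ↔ pvBadAt (decide (a ∈ pvKV)) t j := by
  unfold pvBadAt
  simp only [List.length_cons]
  cases j with
  | zero =>
    constructor
    · rintro (⟨h, _⟩ | ⟨h, hm⟩ | ⟨k, hk, h, hm⟩)
      · omega
      · exact Or.inr (Or.inl ⟨by omega, by simpa using hm⟩)
      · have : k = 0 := by omega
        subst this
        exact Or.inl ⟨rfl, by simpa using hm⟩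
    · rintro (⟨_, hb⟩ | ⟨h, hm⟩ | ⟨k, hk, h, hm⟩)
      · exact Or.inr (Or.inr ⟨0, rfl, by omega, by simpa using hb⟩)
      · exact Or.inr (Or.inl ⟨by omega, by simpa using hm⟩)
      · omega
  | succ j' =>
    constructor
    · rintro (⟨h, _⟩ | ⟨h, hm⟩ | ⟨k, hk, h, hm⟩)
      · omega
      · exact Or.inr (Or.inl ⟨by omega, by simpa using hm⟩)
      · have : k = j' + 1 := by omega
        subst this
        exact Or.inr (Or.inr ⟨j', rfl, by omega, by simpa using hm⟩)
    · rintro (⟨h, _⟩ | ⟨h, hm⟩ | ⟨k, hk, h, hm⟩)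
      · omega
      · exact Or.inr (Or.inl ⟨by omega, by simpa using hm⟩)
      · exact Or.inr (Or.inr ⟨k + 1, by omega, by omega, by simpa using hm⟩)

lemma filter_eq_G (s : List String) : ∀ (n : Int) (bad : List Int) (b : Bool),
    (∀ j : Nat, ((n + j : Int) ∈ bad) ↔ pvBadAt b s j) →
    ((PySem.List.enumerate s n).filter (fun p => decide (p.1 ∉ bad))).map (fun p => p.2) = pvG b s := by
  induction s with
  | nil => intro n bad b _; simp [pvG, PySem.List.enumerate_nil]
  | cons a t ih =>
    intro n bad b H
    have h0 := H 0
    simp only [Nat.cast_zero, add_zero] at h0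
    have hhead : n ∈ bad ↔ (b = true ∨ a ∈ pvKV ∨ a ∈ pvFlag) := by
      rw [h0]; unfold pvBadAt
      simp only [List.length_cons]
      constructor
      · rintro (⟨_, hb⟩ | ⟨h, hm⟩ | ⟨k, hk, _, _⟩)
        · exact Or.inl hb
        · simpa using Or.inr (by simpa using hm)
        · omega
      · rintro (hb | hm)
        · exact Or.inl ⟨by trivial, hb⟩
        · exact Or.inr (Or.inl ⟨by simp, by simpa using hm⟩)
    have htail : ∀ j : Nat, ((n + 1 + j : Int) ∈ bad) ↔ pvBadAt (decide (a ∈ pvKV)) t j := by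
      intro j
      have := H (j + 1)
      rw [badAt_succ] at this
      convert this using 2
      push_cast; ring
    rw [PySem.List.enumerate_cons]
    by_cases hk : b = true ∨ a ∈ pvKV ∨ a ∈ pvFlag
    · have hmem : n ∈ bad := hhead.mpr hk
      rw [List.filter_cons_of_neg (by simp [hmem]), ih (n + 1) bad _ htail]
      simp [pvG, hk]
    · have hmem : n ∉ bad := fun h => hk (hhead.mp h)
      rw [List.filter_cons_of_pos (by simp [hmem]), List.map_cons, ih (n + 1) bad _ htail]
      simp [pvG, hk]

lemma global_bad (args : List String) (j : Nat) :
    ((0 + (j : Int)) ∈ (PySem.List.enumerate args).flatMap pvContrib) ↔ pvBadAt false args j := by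
  rw [List.mem_flatMap]
  constructor
  · rintro ⟨p, hp, hi⟩
    rw [PySem.List.mem_enumerate_iff] at hp
    obtain ⟨k, hk, rfl⟩ := hp
    rw [mem_contrib] at hi
    unfold pvBadAt
    rcases hi with ⟨hm, hj | hj⟩ | ⟨hm, hj⟩
    · have : j = k := by omega
      subst this
      exact Or.inr (Or.inl ⟨hk, Or.inl hm⟩)
    · have : j = k + 1 := by omega
      subst this
      exact Or.inr (Or.inr ⟨k, rfl, hk, hm⟩)
    · have : j = k := by omega
      subst this
      exact Or.inr (Or.inl ⟨hk, Or.inr hm⟩)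
  · intro h
    unfold pvBadAt at h
    rcases h with ⟨_, hb⟩ | ⟨hlt, hm⟩ | ⟨k, hk, hlt, hm⟩
    · exact absurd hb (by simp)
    · refine ⟨(0 + (j : Int), args[j]), ?_, ?_⟩
      · rw [PySem.List.mem_enumerate_iff]; exact ⟨j, hlt, rfl⟩
      · rw [mem_contrib]
        rcases hm with hm | hm
        · exact Or.inl ⟨hm, Or.inl rfl⟩
        · exact Or.inr ⟨hm, rfl⟩
    · refine ⟨(0 + (k : Int), args[k]), ?_, ?_⟩
      · rw [PySem.List.mem_enumerate_iff]; exact ⟨k, hlt, rfl⟩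
      · rw [mem_contrib]
        exact Or.inl ⟨hm, Or.inr (by omega)⟩

-- ===== VERDICT (by name: the statement is the Claim_ definition above) =====
theorem remove_runexp_args_spec : Claim_equal_remove_runexp_args := by
  intro args _
  unfold Spec_remove_runexp_args remove_runexp_args remove_runexp_args_alt
  rw [B_fold args none []]
  simp only [List.nil_append, badIndices_eq]
  exact filter_eq_G args 0 _ false (global_bad args)
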